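-- pv_equiv track=rewrite | github.com/Ko-udon/Algorithm | pyalgo_알고리즘 베스트10 문제풀이/pyalgo_알고리즘_베스트10_문제풀이.py | solution
-- ===== SOURCE A (Python) =====
-- def solution(data):
--     sandwitch = '12341'
--
--     data_str = ''.join(map(str,data)) # 문자열로 바꾸기
--     count = 0
--     while sandwitch in data_str:
--         count+=1
--         data_str = data_str.replace(sandwitch, '', 1) # 샌드위치 패턴 제거, 한번만!
--     return count
--
-- data = [[1, 5, 10, 20, 93], 103]	# 오름차순
-- ===== SOURCE B (Python) =====
-- def solution(data):
--     stack = []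
--     count = 0
--     for c in ''.join(map(str, data)):
--         stack.append(c)
--         if stack[-5:] == ['1', '2', '3', '4', '1']:
--             del stack[-5:]
--             count += 1
--     return count
-- ===== Notes on version B (the rewrite author's own statement) =====
-- stated objective: alternative
-- what changed: Replaced the repeated substring-search-and-rebuild while loop with a single left-to-right pass that maintains a character stack and counts each time the stack's top five characters form the pattern '12341'.
import Mathlib
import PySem

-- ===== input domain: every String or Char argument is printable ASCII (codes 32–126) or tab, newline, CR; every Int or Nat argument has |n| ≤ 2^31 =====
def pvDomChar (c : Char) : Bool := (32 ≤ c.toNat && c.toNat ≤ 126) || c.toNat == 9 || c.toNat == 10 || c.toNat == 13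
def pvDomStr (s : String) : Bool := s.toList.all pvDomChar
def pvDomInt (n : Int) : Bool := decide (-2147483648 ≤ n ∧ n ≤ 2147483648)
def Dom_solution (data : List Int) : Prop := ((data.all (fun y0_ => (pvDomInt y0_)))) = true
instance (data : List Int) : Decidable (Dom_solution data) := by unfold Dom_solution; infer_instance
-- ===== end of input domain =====

-- B replaces A's repeated search-and-remove while loop by a single stack pass counting pattern pops (objective: alternative).

-- ===== PORT A =====
def pvSand : List Char := ['1', '2', '3', '4', '1']

-- hand port of data_str.replace('12341', '', 1): the replacement string is '', so it
-- deletes exactly the FIRST occurrence of the pattern (exact CPython behaviour, count=1)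
def pvRemoveFirst (s : List Char) : List Char :=
  let i := (PySem.Chars.find s pvSand).toNat
  s.take i ++ s.drop (i + 5)

theorem pvRemoveFirst_length (s : List Char) (h : PySem.Chars.isIn pvSand s = true) :
    (pvRemoveFirst s).length < s.length := by
  have hnn : 0 ≤ PySem.Chars.find s pvSand :=
    (PySem.Chars.find_nonneg_iff s pvSand).mpr ((PySem.Chars.isIn_iff_infix pvSand s).mp h)
  have hle : PySem.Chars.find s pvSand ≤ (s.length : Int) := PySem.Chars.find_le_length s pvSand
  obtain ⟨hpre, -⟩ := PySem.Chars.find_spec hnn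
  have h5 : (5 : Nat) ≤ (s.drop (PySem.Chars.find s pvSand).toNat).length := by
    simpa [pvSand] using hpre.length_le
  have hlen : (PySem.Chars.find s pvSand).toNat ≤ s.length := by omega
  simp only [pvRemoveFirst, List.length_append, List.length_take, List.length_drop]
  simp only [List.length_drop] at h5
  omega

def solutionLoop (s : List Char) (count : Int) : Int :=
  if h : PySem.Chars.isIn pvSand s = true then
    solutionLoop (pvRemoveFirst s) (count + 1)
  else count
termination_by s.length
decreasing_by exact pvRemoveFirst_length s h

def solution (data : List Int) : Int :=
  solutionLoop (PySem.Chars.join [] (data.map PySem.Int.toChars)) 0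

-- ===== PORT B =====
-- the stack is kept most-recent-first, so Python's 'stack[-5:] == list("12341")'
-- is 'st.take 5 = pvSandRev' (the pattern reversed) and 'del stack[-5:]' is 'st.drop 5'
def pvSandRev : List Char := ['1', '4', '3', '2', '1']

def pvStep (acc : List Char × Int) (c : Char) : List Char × Int :=
  let st := c :: acc.1
  if st.take 5 = pvSandRev then (st.drop 5, acc.2 + 1) else (st, acc.2)

def solution_alt (data : List Int) : Int :=
  ((PySem.Chars.join [] (data.map PySem.Int.toChars)).foldl pvStep ([], 0)).2

-- ===== PRECONDITION & SPEC =====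
def Spec_solution (data : List Int) (out : Int) : Prop := out = solution_alt data
instance (data : List Int) (out : Int) : Decidable (Spec_solution data out) := by unfold Spec_solution; infer_instance

-- ===== CLAIM (what is proved, stated in full; the proofs are below) =====
def Claim_equal_solution : Prop := ∀ (data : List Int), Dom_solution data → Spec_solution data (solution data)

-- ===== LEMMAS AND PROOFS =====

theorem pvSand_reverse : pvSand.reverse = pvSandRev := by decide

-- B's pop test fires exactly when the pattern (reversed) heads the stack
theorem take5_iff (l : List Char) : l.take 5 = pvSandRev ↔ pvSandRev <+: l := by
  rw [List.prefix_iff_eq_take]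
  show l.take 5 = pvSandRev ↔ pvSandRev = l.take pvSandRev.length
  rw [show pvSandRev.length = 5 from rfl]
  exact eq_comm

theorem suffix_of_rev_prefix {t : List Char} (h : pvSandRev <+: t.reverse) : pvSand <:+ t := by
  rw [← pvSand_reverse] at h
  exact List.reverse_prefix.mp h

-- processing a block during which no pop can fire just pushes it onto the stack
theorem foldl_no_pop (s : List Char) :
    ∀ (st : List Char) (c : Int),
      (∀ t, t <+: s → t ≠ [] → ¬ pvSandRev <+: (t.reverse ++ st)) →
      s.foldl pvStep (st, c) = (s.reverse ++ st, c) := by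
  induction s with
  | nil => intro st c _; simp
  | cons a s' ih =>
    intro st c h
    have h1 : ¬ ((a :: st).take 5 = pvSandRev) := by
      rw [take5_iff]
      simpa using h [a] ⟨s', rfl⟩ (by simp)
    have h1' : ¬ (a :: st.take 4 = pvSandRev) := by simpa using h1
    have hstep : pvStep (st, c) a = (a :: st, c) := by
      simp [pvStep, h1']
    rw [List.foldl_cons, hstep,
      ih (a :: st) c (fun t ht htne => by
        have := h (a :: t) (List.cons_prefix_cons.mpr ⟨rfl, ht⟩) (by simp)
        simpa [List.append_assoc] using this)]
    simp

-- A's loop equals B's single pass, for every initial count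
theorem loop_eq (n : Nat) :
    ∀ (s : List Char), s.length ≤ n → ∀ (c : Int),
      solutionLoop s c = (s.foldl pvStep ([], c)).2 := by
  induction n with
  | zero =>
    intro s hs c
    have : s = [] := List.eq_nil_of_length_eq_zero (by omega)
    subst this
    rw [solutionLoop, dif_neg (by decide)]
    rfl
  | succ n ih =>
    intro s hs c
    by_cases h : PySem.Chars.isIn pvSand s = true
    · -- decompose s = u ++ pvSand ++ v at the FIRST occurrence
      have hnn : 0 ≤ PySem.Chars.find s pvSand :=
        (PySem.Chars.find_nonneg_iff s pvSand).mpr ((PySem.Chars.isIn_iff_infix pvSand s).mp h)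
      obtain ⟨hpre, hmin⟩ := PySem.Chars.find_spec hnn
      set i := (PySem.Chars.find s pvSand).toNat with hi
      obtain ⟨v, hv⟩ := hpre
      set u := s.take i with hu
      have hile : i ≤ s.length := by
        have := PySem.Chars.find_le_length s pvSand
        omega
      have hulen : u.length = i := by simp [hu, hile]
      have hs_eq : s = u ++ (pvSand ++ v) := by
        rw [hu, hv, List.take_append_drop]
      -- no occurrence of the pattern ends strictly before position i + 5
      have hkey : ∀ t, t <+: s → t.length < i + 5 → ¬ pvSand <:+ t := by
        rintro t ⟨r, hr⟩ hlt ⟨w, hw⟩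
        have hlen : t.length = w.length + 5 := by rw [← hw]; simp [pvSand]
        have hdrop : s.drop w.length = pvSand ++ r := by
          rw [← hr, ← hw, List.append_assoc, List.drop_left]
        exact hmin w.length (by omega) (by rw [hdrop]; exact ⟨r, rfl⟩)
      -- process u from the empty stack: pure push
      have hfu : ∀ c' : Int, u.foldl pvStep ([], c') = (u.reverse, c') := by
        intro c'
        have := foldl_no_pop u [] c' (fun t ht htne hsuf => by
          rw [List.append_nil] at hsuf
          exact hkey t (ht.trans (hu ▸ List.take_prefix i s))
            (by have := ht.length_le; omega) (suffix_of_rev_prefix hsuf))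
        simpa using this
      -- process the pattern from stack u.reverse: four pushes then one pop
      have hfp : ∀ c' : Int, pvSand.foldl pvStep (u.reverse, c') = (u.reverse, c' + 1) := by
        intro c'
        have hsplit : pvSand = ['1', '2', '3', '4'] ++ ['1'] := by decide
        rw [hsplit, List.foldl_append]
        have hq : ∀ t, t <+: (['1', '2', '3', '4'] : List Char) → t ≠ [] →
            ¬ pvSandRev <+: (t.reverse ++ u.reverse) := by
          intro t ht htne hsuf
          rw [show t.reverse ++ u.reverse = (u ++ t).reverse by simp] at hsuf
          have h2 : pvSand <:+ (u ++ t) := suffix_of_rev_prefix hsuf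
          have h3 : u ++ t <+: s := by
            rw [hs_eq]
            exact (List.prefix_append_right_inj u).mpr
              (ht.trans (by rw [hsplit, List.append_assoc]; exact List.prefix_append _ _))
          exact hkey (u ++ t) h3 (by have := ht.length_le; simp at this ⊢; omega) h2
        rw [foldl_no_pop ['1', '2', '3', '4'] u.reverse c' hq]
        simp [pvStep, pvSandRev]
      -- the removed-first string
      have hrm : pvRemoveFirst s = u ++ v := by
        show s.take i ++ s.drop (i + 5) = u ++ v
        rw [← hu]
        congr 1
        rw [← List.drop_drop, ← hv]
        simp [pvSand]
      rw [solutionLoop, dif_pos h, hrm,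
        ih (u ++ v) (by
          have := congrArg List.length hs_eq
          simp [pvSand] at this ⊢
          omega) (c + 1)]
      rw [hs_eq, List.foldl_append, hfu (c + 1), List.foldl_append, hfu c,
        List.foldl_append, hfp c]
    · rw [solutionLoop, dif_neg h,
        foldl_no_pop s [] c (fun t ht htne hsuf => by
          rw [List.append_nil] at hsuf
          exact h ((PySem.Chars.isIn_iff_infix pvSand s).mpr
            ((suffix_of_rev_prefix hsuf).isInfix.trans ht.isInfix)))]

-- ===== VERDICT (by name: the statement is the Claim_ definition above) =====
theorem solution_spec : Claim_equal_solution := by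
  intro data _
  unfold Spec_solution solution solution_alt
  exact loop_eq _ _ le_rfl 0
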